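-- pv_equiv track=rewrite | github.com/UCB-ADRS/ADRS-Leaderboard | solutions/cloudcast/glia/resources/solution.py | _round_robin_partition_assignment
-- ===== SOURCE A (Python) =====
-- from typing import Any, Dict, List, Optional, Set, Tuple
--
-- def _round_robin_partition_assignment(num_partitions: int, counts: List[int]) -> List[int]:
--     """Return list mapping partition->bucket index (0..len(counts)-1)."""
--     rem = list(counts)
--     k = len(rem)
--     out: List[int] = []
--     i = 0
--     while len(out) < num_partitions:
--         if rem[i] > 0:
--             out.append(i)
--             rem[i] -= 1
--         i = (i + 1) % k
--     return out
-- ===== SOURCE B (Python) =====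
-- from typing import List
--
-- def _round_robin_partition_assignment(num_partitions: int, counts: List[int]) -> List[int]:
--     """Return list mapping partition->bucket index (0..len(counts)-1)."""
--     out: List[int] = []
--     active = [(i, c) for i, c in enumerate(counts) if c > 0]
--     # emit whole rounds at once; depleted buckets drop out of `active`
--     while len(out) + len(active) <= num_partitions and active:
--         out.extend(i for i, _ in active)
--         active = [(i, c - 1) for i, c in active if c > 1]
--     need = max(num_partitions - len(out), 0)
--     out.extend(i for i, _ in active[:need])
--     return out
-- ===== Notes on version B (the rewrite author's own statement) =====
-- stated objective: alternative
-- what changed: B replaces A's one-index-per-iteration modular scan (which re-visits depleted buckets) by whole-round batching over a shrinking list of active buckets: each round it emits every active bucket index at once and filters out buckets that hit zero.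
import Mathlib
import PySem

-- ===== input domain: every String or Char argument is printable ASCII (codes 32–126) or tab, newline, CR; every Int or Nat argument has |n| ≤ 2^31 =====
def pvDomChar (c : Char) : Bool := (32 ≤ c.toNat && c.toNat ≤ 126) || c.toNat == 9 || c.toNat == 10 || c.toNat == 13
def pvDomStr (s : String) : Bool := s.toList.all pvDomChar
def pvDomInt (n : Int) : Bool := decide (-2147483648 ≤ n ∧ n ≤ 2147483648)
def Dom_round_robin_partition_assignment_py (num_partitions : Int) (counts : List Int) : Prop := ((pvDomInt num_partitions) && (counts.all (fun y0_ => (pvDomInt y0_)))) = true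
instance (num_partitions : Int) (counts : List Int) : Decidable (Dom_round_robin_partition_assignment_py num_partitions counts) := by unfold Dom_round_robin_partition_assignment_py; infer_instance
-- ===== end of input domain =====

-- B batches whole round-robin rounds over a shrinking list of active (positive-count) buckets
-- instead of A's per-index modular scan, so depleted buckets are never re-scanned (alternative algorithm).

-- ===== PORT A =====
-- A's while loop, step for step; `fuel` only makes the loop total: under
-- Pre_ (enough total count, or num_partitions ≤ 0) the loop stops before fuel runs out.
def aLoop : Nat → Int → List Int → Nat → List Int → Nat → List Int
  | 0, _, _, _, out, _ => out
  | fuel+1, np, rem, k, out, i =>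
    if (out.length : Int) < np then
      match PySem.List.pyGet? rem (i : Int) with
      | none => out   -- Python: IndexError (outside Pre_)
      | some v =>
        if v > 0 then
          aLoop fuel np (rem.set i (v - 1)) k (out ++ [(i : Int)]) ((i + 1) % k)
        else
          aLoop fuel np rem k out ((i + 1) % k)
    else out

def round_robin_partition_assignment_py (num_partitions : Int) (counts : List Int) : List Int :=
  aLoop (num_partitions.toNat * counts.length + 1) num_partitions counts counts.length [] 0

-- ===== PORT B =====
-- [(i, c - 1) for i, c in active if c > 1]
def bStep (active : List (Int × Int)) : List (Int × Int) :=
  (active.filter (fun p => p.2 > 1)).map (fun p => (p.1, p.2 - 1))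

-- B's while loop followed by the final partial round; fuel is only for totality
def bLoop : Nat → Int → List Int → List (Int × Int) → List Int
  | 0, _, out, _ => out
  | fuel+1, np, out, active =>
    if ((out.length : Int) + active.length ≤ np ∧ active ≠ []) then
      bLoop fuel np (out ++ active.map Prod.fst) (bStep active)
    else
      out ++ ((active.take (max (np - out.length) 0).toNat).map Prod.fst)

def round_robin_partition_assignment_py_alt (num_partitions : Int) (counts : List Int) : List Int :=
  bLoop (num_partitions.toNat + 1) num_partitions []
    ((PySem.List.enumerate counts 0).filter (fun p => p.2 > 0))

-- ===== PRECONDITION & SPEC =====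
-- Pre_ excludes exactly the inputs on which A does not return: counts = [] with
-- num_partitions > 0 (IndexError) and num_partitions > sum of positive counts (infinite loop).
def Pre_round_robin_partition_assignment_py (num_partitions : Int) (counts : List Int) : Prop :=
  num_partitions ≤ 0 ∨ num_partitions ≤ (counts.map (fun c => max c 0)).sum
instance (num_partitions : Int) (counts : List Int) : Decidable (Pre_round_robin_partition_assignment_py num_partitions counts) := by unfold Pre_round_robin_partition_assignment_py; infer_instance

def pvWitness_round_robin_partition_assignment_py : Int × List Int := (4, [2, 0, 3])

def Spec_round_robin_partition_assignment_py (num_partitions : Int) (counts : List Int) (out : List Int) : Prop := out = round_robin_partition_assignment_py_alt num_partitions counts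
instance (num_partitions : Int) (counts : List Int) (out : List Int) : Decidable (Spec_round_robin_partition_assignment_py num_partitions counts out) := by unfold Spec_round_robin_partition_assignment_py; infer_instance

-- ===== CLAIM (what is proved, stated in full; the proofs are below) =====
def Claim_equal_round_robin_partition_assignment_py : Prop := ∀ (num_partitions : Int) (counts : List Int), Dom_round_robin_partition_assignment_py num_partitions counts → Pre_round_robin_partition_assignment_py num_partitions counts → Spec_round_robin_partition_assignment_py num_partitions counts (round_robin_partition_assignment_py num_partitions counts)
-- ===== LEMMAS AND PROOFS =====

-- the active buckets of `rem`, indexed from `off`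
def activeOf : List Int → Int → List (Int × Int)
  | [], _ => []
  | c :: t, off => if c > 0 then (off, c) :: activeOf t (off + 1) else activeOf t (off + 1)

-- `rem` after one full round
def decPos (rem : List Int) : List Int := rem.map (fun c => if c > 0 then c - 1 else c)

def totalPos (rem : List Int) : Int := (rem.map (fun c => max c 0)).sum

theorem activeOf_step (rem : List Int) (off : Int) :
    activeOf (decPos rem) off = bStep (activeOf rem off) := by
  induction rem generalizing off with
  | nil => simp [decPos, activeOf, bStep]
  | cons c t ih =>
    have ih' := ih (off + 1)
    simp only [decPos, List.map_cons] at *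
    by_cases h1 : c > 1
    · simp only [activeOf, bStep, List.filter_cons, if_pos (show c - 1 > 0 by omega),
        if_pos (show c > 0 by omega), decide_eq_true h1, List.map_cons] at ih' ⊢
      exact congrArg _ ih'
    · by_cases h2 : c > 0
      · have hd : (decide ((off, c).2 > 1)) = false := by simp; omega
        simp only [activeOf, bStep, List.filter_cons, if_neg (show ¬ (c - 1 > 0) by omega),
          if_pos h2, hd] at ih' ⊢
        exact ih'
      · simp only [activeOf, if_neg (show ¬ (c - 1 > 0) by omega), if_neg h2] at ih' ⊢
        exact ih'

theorem totalPos_dec (rem : List Int) (off : Int) :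
    totalPos (decPos rem) = totalPos rem - (activeOf rem off).length := by
  induction rem generalizing off with
  | nil => simp [decPos, totalPos, activeOf]
  | cons c t ih =>
    simp only [decPos, totalPos, List.map_cons, List.sum_cons, activeOf] at *
    by_cases h : c > 0
    · simp only [if_pos h, List.length_cons]
      have := ih (off + 1)
      push_cast
      push_cast at this
      omega
    · simp only [if_neg h]
      have := ih (off + 1)
      omega

theorem totalPos_nonneg (rem : List Int) : 0 ≤ totalPos rem := by
  induction rem with
  | nil => simp [totalPos]
  | cons c t ih => simp only [totalPos, List.map_cons, List.sum_cons] at *; omega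

theorem activeOf_ne_of_pos (rem : List Int) (off : Int) (h : 0 < totalPos rem) :
    activeOf rem off ≠ [] := by
  induction rem generalizing off with
  | nil => simp [totalPos] at h
  | cons c t ih =>
    simp only [totalPos, List.map_cons, List.sum_cons] at h
    simp only [activeOf]
    by_cases hc : c > 0
    · simp [hc]
    · have : 0 < totalPos t := by simp only [totalPos]; omega
      simp only [if_neg hc]
      exact ih _ this

theorem enum_filter (counts : List Int) (off : Int) :
    (PySem.List.enumerate counts off).filter (fun p => p.2 > 0) = activeOf counts off := by
  induction counts generalizing off with
  | nil => simp [PySem.List.enumerate_nil, activeOf]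
  | cons c t ih =>
    simp only [PySem.List.enumerate_cons, List.filter_cons, activeOf]
    by_cases h : c > 0 <;> simp [h, ih]

theorem activeOf_length (l : List Int) (o o' : Int) :
    (activeOf l o).length = (activeOf l o').length := by
  induction l generalizing o o' with
  | nil => rfl
  | cons c t ih =>
    simp only [activeOf]
    by_cases h : c > 0 <;> simp [h, ih (o + 1) (o' + 1)]

theorem activeOf_cons_pos {c : Int} (t : List Int) (off : Int) (h : c > 0) :
    activeOf (c :: t) off = (off, c) :: activeOf t (off + 1) := by
  simp [activeOf, h]

theorem activeOf_cons_nonpos {c : Int} (t : List Int) (off : Int) (h : ¬ c > 0) :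
    activeOf (c :: t) off = activeOf t (off + 1) := by
  simp [activeOf, h]

theorem pyGet_mid (pre : List Int) (c : Int) (t : List Int) :
    PySem.List.pyGet? (pre ++ c :: t) ((pre.length : Nat) : Int) = some c := by
  rw [PySem.List.pyGet?_natCast]
  simp

theorem set_mid (pre : List Int) (c x : Int) (t : List Int) :
    (pre ++ c :: t).set pre.length x = pre ++ x :: t := by
  simp

-- one (partial) round of A that reaches the target: A stops inside the segment
theorem pass_a (suf : List Int) : ∀ (pre out : List Int) (np : Int) (fuel k : Nat),
    k = pre.length + suf.length →
    suf.length + 1 ≤ fuel →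
    np - out.length ≤ (activeOf suf pre.length).length →
    aLoop fuel np (pre ++ suf) k out pre.length
      = out ++ ((activeOf suf (pre.length : Int)).map Prod.fst).take (np - out.length).toNat := by
  induction suf with
  | nil =>
    intro pre out np fuel k hk hfuel hneed
    obtain ⟨f, rfl⟩ : ∃ f, fuel = f + 1 := ⟨fuel - 1, by omega⟩
    simp only [activeOf, List.length_nil] at hneed ⊢
    have hlt : ¬ ((out.length : Int) < np) := by omega
    simp only [aLoop, if_neg hlt]
    have : (np - out.length).toNat = 0 := by omega
    simp [this]
  | cons c t ih =>
    intro pre out np fuel k hk hfuel hneed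
    obtain ⟨f, rfl⟩ : ∃ f, fuel = f + 1 := ⟨fuel - 1, by omega⟩
    by_cases hlt : (out.length : Int) < np
    · simp only [aLoop, if_pos hlt, pyGet_mid]
      by_cases hc : c > 0
      · simp only [if_pos hc, set_mid]
        rcases t with _ | ⟨d, t'⟩
        · -- last slot of the cycle: the target is reached right here
          have hneed' : np - (out.length : Int) ≤ 1 := by
            rw [activeOf_cons_pos [] _ hc] at hneed
            simpa [activeOf] using hneed
          obtain ⟨f', rfl⟩ : ∃ f', f = f' + 1 := ⟨f - 1, by simp at hfuel; omega⟩
          have hnotlt : ¬ (((out ++ [(pre.length : Int)]).length : Int) < np) := by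
            simp; omega
          simp only [aLoop, if_neg hnotlt]
          have h3 : (np - (out.length : Int)).toNat = 1 := by omega
          simp [activeOf, hc, h3]
        · -- continue within the cycle
          have hklt : pre.length + 1 < k := by
            simp only [List.length_cons] at hk; omega
          have hmod : (pre.length + 1) % k = (pre ++ [c - 1]).length := by
            rw [Nat.mod_eq_of_lt hklt]; simp
          have hre : pre ++ (c - 1) :: d :: t' = (pre ++ [c - 1]) ++ d :: t' := by simp
          rw [hmod, hre, ih (pre ++ [c - 1]) (out ++ [(pre.length : Int)]) np f k
              (by simp at hk ⊢; omega) (by simp at hfuel ⊢; omega)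
              (by
                rw [activeOf_cons_pos _ _ hc, List.length_cons] at hneed
                rw [activeOf_length (d :: t') _ ((pre.length : Int) + 1)]
                rw [show (out ++ [(pre.length : Int)]).length = out.length + 1 by simp]
                push_cast at hneed ⊢
                omega)]
          have h1 : (((pre ++ [c - 1]).length : Nat) : Int) = (pre.length : Int) + 1 := by simp
          have h2 : (((out ++ [(pre.length : Int)]).length : Nat) : Int)
              = (out.length : Int) + 1 := by simp
          have hto : (np - ((out.length : Int) + 1)).toNat + 1 = (np - (out.length : Int)).toNat := by
            omega
          rw [h1, h2, ← hto, activeOf_cons_pos _ _ hc]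
          simp only [List.map_cons, List.take_succ_cons, List.append_assoc,
            List.cons_append, List.nil_append]
      · simp only [if_neg hc]
        rcases t with _ | ⟨d, t'⟩
        · -- cycle ends on a zero bucket but the target was not reached: contradiction
          exfalso
          rw [activeOf_cons_nonpos [] _ hc] at hneed
          simp [activeOf] at hneed
          omega
        · have hklt : pre.length + 1 < k := by
            simp only [List.length_cons] at hk; omega
          have hmod : (pre.length + 1) % k = (pre ++ [c]).length := by
            rw [Nat.mod_eq_of_lt hklt]; simp
          have hre : pre ++ c :: d :: t' = (pre ++ [c]) ++ d :: t' := by simp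
          rw [hmod, hre, ih (pre ++ [c]) out np f k
              (by simp at hk ⊢; omega) (by simp at hfuel ⊢; omega)
              (by
                rw [activeOf_cons_nonpos _ _ hc] at hneed
                rw [activeOf_length (d :: t') _ ((pre.length : Int) + 1)]
                exact hneed)]
          have h1 : (((pre ++ [c]).length : Nat) : Int) = (pre.length : Int) + 1 := by simp
          rw [h1, activeOf_cons_nonpos _ _ hc]
    · simp only [aLoop, if_neg hlt]
      have : (np - out.length).toNat = 0 := by omega
      simp [this]

-- one full round of A that does not reach the target: back to index 0 with decremented buckets
theorem pass_b (suf : List Int) : ∀ (pre out : List Int) (np : Int) (fuel k : Nat),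
    k = pre.length + suf.length →
    suf.length ≤ fuel →
    ((activeOf suf pre.length).length : Int) < np - out.length →
    suf ≠ [] →
    aLoop fuel np (pre ++ suf) k out pre.length
      = aLoop (fuel - suf.length) np (pre ++ decPos suf) k
          (out ++ (activeOf suf (pre.length : Int)).map Prod.fst) 0 := by
  induction suf with
  | nil => intro _ _ _ _ _ _ _ _ h; exact absurd rfl h
  | cons c t ih =>
    intro pre out np fuel k hk hfuel hneed _
    simp only [List.length_cons] at hfuel
    obtain ⟨f, rfl⟩ : ∃ f, fuel = f + 1 := ⟨fuel - 1, by omega⟩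
    have hcount : (0 : Int) ≤ (activeOf (c :: t) pre.length).length := by positivity
    have hlt : (out.length : Int) < np := by omega
    simp only [aLoop, if_pos hlt, pyGet_mid]
    by_cases hc : c > 0
    · simp only [if_pos hc, set_mid]
      rcases t with _ | ⟨d, t'⟩
      · have hmod : (pre.length + 1) % k = 0 := by
          simp only [List.length_cons, List.length_nil] at hk
          subst hk
          simp
        rw [hmod]
        simp [decPos, activeOf, hc]
      · have hklt : pre.length + 1 < k := by
          simp only [List.length_cons] at hk; omega
        have hmod : (pre.length + 1) % k = (pre ++ [c - 1]).length := by
          rw [Nat.mod_eq_of_lt hklt]; simp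
        have hre : pre ++ (c - 1) :: d :: t' = (pre ++ [c - 1]) ++ d :: t' := by simp
        rw [hmod, hre, ih (pre ++ [c - 1]) (out ++ [(pre.length : Int)]) np f k
            (by simp at hk ⊢; omega) (by simp at hfuel ⊢; omega)
            (by
              rw [activeOf_cons_pos _ _ hc, List.length_cons] at hneed
              rw [activeOf_length (d :: t') _ ((pre.length : Int) + 1)]
              rw [show (out ++ [(pre.length : Int)]).length = out.length + 1 by simp]
              push_cast at hneed ⊢
              omega)
            (by simp)]
        have h1 : (((pre ++ [c - 1]).length : Nat) : Int) = (pre.length : Int) + 1 := by simp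
        rw [h1, activeOf_cons_pos _ _ hc]
        simp [decPos, List.append_assoc, hc]
    · simp only [if_neg hc]
      rcases t with _ | ⟨d, t'⟩
      · have hmod : (pre.length + 1) % k = 0 := by
          simp only [List.length_cons, List.length_nil] at hk
          subst hk
          simp
        rw [hmod]
        simp [decPos, activeOf, hc]
      · have hklt : pre.length + 1 < k := by
          simp only [List.length_cons] at hk; omega
        have hmod : (pre.length + 1) % k = (pre ++ [c]).length := by
          rw [Nat.mod_eq_of_lt hklt]; simp
        have hre : pre ++ c :: d :: t' = (pre ++ [c]) ++ d :: t' := by simp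
        rw [hmod, hre, ih (pre ++ [c]) out np f k
            (by simp at hk ⊢; omega) (by simp at hfuel ⊢; omega)
            (by
              rw [activeOf_cons_nonpos _ _ hc] at hneed
              rw [activeOf_length (d :: t') _ ((pre.length : Int) + 1)]
              exact hneed) (by simp)]
        have h1 : (((pre ++ [c]).length : Nat) : Int) = (pre.length : Int) + 1 := by simp
        rw [h1, activeOf_cons_nonpos _ _ hc]
        simp [decPos, hc, List.append_assoc]

theorem bLoop_done (fuel : Nat) (np : Int) (out : List Int) (active : List (Int × Int))
    (hf : 1 ≤ fuel) (h : np ≤ out.length) : bLoop fuel np out active = out := by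
  obtain ⟨f, rfl⟩ : ∃ f, fuel = f + 1 := ⟨fuel - 1, by omega⟩
  have hcond : ¬ (((out.length : Int) + active.length ≤ np) ∧ active ≠ []) := by
    rintro ⟨h1, h2⟩
    have : 0 < active.length := List.length_pos_iff.mpr h2
    omega
  simp only [bLoop, if_neg hcond]
  have : (max (np - out.length) 0).toNat = 0 := by omega
  simp [this]

theorem main_lemma (n : Nat) : ∀ (np : Int) (rem out : List Int) (afuel bfuel : Nat),
    (np - out.length).toNat ≤ n →
    np - out.length ≤ totalPos rem →
    (np - out.length).toNat * rem.length + 1 ≤ afuel →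
    (np - out.length).toNat + 1 ≤ bfuel →
    aLoop afuel np rem rem.length out 0 = bLoop bfuel np out (activeOf rem 0) := by
  induction n with
  | zero =>
    intro np rem out afuel bfuel hn _ haf hbf
    have ht : np ≤ out.length := by omega
    obtain ⟨f, rfl⟩ : ∃ f, afuel = f + 1 := ⟨afuel - 1, by omega⟩
    have hlt : ¬ ((out.length : Int) < np) := by omega
    simp only [aLoop, if_neg hlt]
    exact (bLoop_done bfuel np out _ (by omega) ht).symm
  | succ n ih =>
    intro np rem out afuel bfuel hn htot haf hbf
    by_cases ht : np ≤ out.length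
    · obtain ⟨f, rfl⟩ : ∃ f, afuel = f + 1 := ⟨afuel - 1, by omega⟩
      have hlt : ¬ ((out.length : Int) < np) := by omega
      simp only [aLoop, if_neg hlt]
      exact (bLoop_done bfuel np out _ (by omega) ht).symm
    · push_neg at ht
      have htpos : 0 < np - out.length := by omega
      have hane : activeOf rem 0 ≠ [] := activeOf_ne_of_pos rem 0 (by omega)
      have hcpos : 0 < (activeOf rem 0).length := List.length_pos_iff.mpr hane
      have htn : 1 ≤ (np - out.length).toNat := by omega
      obtain ⟨bf, rfl⟩ : ∃ bf, bfuel = bf + 1 := ⟨bfuel - 1, by omega⟩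
      by_cases hcase : ((activeOf rem 0).length : Int) < np - out.length
      · -- whole round emitted, target not yet reached: both sides recurse
        have hA := pass_b rem [] out np afuel rem.length (by simp) (by
            have h3 := Nat.le_mul_of_pos_left rem.length
              (show 0 < (np - (out.length : Int)).toNat by omega)
            omega)
          (by simpa using hcase) (by rintro rfl; simp [activeOf] at hane)
        simp only [List.nil_append, List.length_nil, Nat.cast_zero] at hA
        rw [hA]
        have hcond : ((out.length : Int) + (activeOf rem 0).length ≤ np) ∧ activeOf rem 0 ≠ [] :=
          ⟨by omega, hane⟩
        simp only [bLoop, if_pos hcond]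
        have hlen : (decPos rem).length = rem.length := by simp [decPos]
        rw [← hlen]
        have hout' : ((out ++ (activeOf rem 0).map Prod.fst).length : Int)
            = out.length + (activeOf rem 0).length := by push_cast; simp
        have hstep := activeOf_step rem 0
        rw [← hstep]
        apply ih
        · rw [hout']; omega
        · rw [hout', totalPos_dec rem 0]; omega
        · rw [hout', hlen]
          have h1 : (np - ((out.length : Int) + (activeOf rem 0).length)).toNat + 1
              ≤ (np - out.length).toNat := by omega
          have h2 := Nat.mul_le_mul_right rem.length h1
          simp only [Nat.add_mul, Nat.one_mul] at h2
          have h3 := Nat.mul_le_mul_right rem.length htn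
          omega
        · rw [hout']; omega
      · -- the target is reached inside this round
        push_neg at hcase
        have hA := pass_a rem [] out np afuel rem.length (by simp) (by
            have h3 := Nat.le_mul_of_pos_left rem.length
              (show 0 < (np - (out.length : Int)).toNat by omega)
            omega)
          (by simpa using hcase)
        simp only [List.nil_append, List.length_nil, Nat.cast_zero] at hA
        rw [hA]
        by_cases heq : ((activeOf rem 0).length : Int) ≤ np - out.length
        · -- exact fit: B emits the whole round, then is done
          have hcond : ((out.length : Int) + (activeOf rem 0).length ≤ np) ∧ activeOf rem 0 ≠ [] :=
            ⟨by omega, hane⟩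
          simp only [bLoop, if_pos hcond]
          have hlen2 : (out ++ (activeOf rem 0).map Prod.fst).length
              = out.length + (activeOf rem 0).length := by simp
          rw [bLoop_done bf np _ _ (by omega) (by rw [hlen2]; push_cast; omega)]
          have : (np - (out.length : Int)).toNat = ((activeOf rem 0).map Prod.fst).length := by
            simp only [List.length_map]; omega
          rw [this, List.take_length]
        · -- strict overflow: B takes a prefix of the round
          push_neg at heq
          have hcond : ¬ (((out.length : Int) + (activeOf rem 0).length ≤ np) ∧ activeOf rem 0 ≠ []) := by
            rintro ⟨h1, _⟩; omega
          simp only [bLoop, if_neg hcond]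
          have hmax : max (np - (out.length : Int)) 0 = np - out.length := by omega
          rw [hmax, List.map_take]

-- ===== VERDICT (by name: the statement is the Claim_ definition above) =====
theorem round_robin_partition_assignment_py_spec : Claim_equal_round_robin_partition_assignment_py := by
  intro np counts _ hpre
  unfold Spec_round_robin_partition_assignment_py
  unfold round_robin_partition_assignment_py round_robin_partition_assignment_py_alt
  rw [enum_filter]
  have htot : np ≤ totalPos counts := by
    rcases hpre with h | h
    · have := totalPos_nonneg counts; omega
    · exact h
  have := main_lemma np.toNat np counts [] (np.toNat * counts.length + 1) (np.toNat + 1)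
    (by simp) (by simpa using htot) (by simp) (by simp)
  simpa using this
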